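-- pv_equiv track=rewrite | github.com/dprgarner/codejam | python/fashion.py | score_grid
-- ===== SOURCE A (Python) =====
-- def score_grid(grid):
--     def score_element(c):
--         if c == 'o':
--             return 2
--         if c == '+' or c == 'x':
--             return 1
--         return 0
--
--     sum = 0
--     n = len(grid)
--     for i in range(n):
--         for j in range(n):
--             sum += score_element(grid[i][j])
--     return sum
-- ===== SOURCE B (Python) =====
-- def score_grid(grid):
--     n = len(grid)
--     total = 0
--     for j in range(n):
--         col = ''.join(row[j] for row in grid)
--         total += 2 * col.count('o') + col.count('+') + col.count('x')
--     return total
-- ===== Notes on version B (the rewrite author's own statement) =====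
-- stated objective: alternative
-- what changed: Traverses the grid column-major: builds each of the n column strings with ''.join(row[j] for row in grid) and scores it with three per-symbol str.count passes and the weights 2/1/1, instead of A's row-major per-cell scoring loop with a score_element helper.
import Mathlib
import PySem

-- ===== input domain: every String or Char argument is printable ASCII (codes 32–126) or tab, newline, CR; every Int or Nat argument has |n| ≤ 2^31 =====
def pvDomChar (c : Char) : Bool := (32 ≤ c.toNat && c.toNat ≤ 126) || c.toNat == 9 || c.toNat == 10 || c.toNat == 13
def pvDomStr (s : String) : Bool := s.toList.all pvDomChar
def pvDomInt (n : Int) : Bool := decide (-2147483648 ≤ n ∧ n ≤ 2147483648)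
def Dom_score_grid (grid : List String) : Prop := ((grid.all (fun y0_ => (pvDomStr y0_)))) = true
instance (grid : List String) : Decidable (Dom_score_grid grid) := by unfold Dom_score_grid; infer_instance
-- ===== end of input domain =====

-- B traverses column-major: it builds each column string with ''.join and scores it with three per-symbol str.count passes,
-- instead of A's row-major per-cell scoring loop.
-- Pre_ excludes grids with a row shorter than the number of rows, on which Python A (and B) raise IndexError.


-- ===== PORT A =====
-- row[j] (exact where in range; Pre_ guarantees that; the default is never read under Pre_)
def pvCharAt (row : String) (j : Int) : Char :=
  (PySem.Str.pyGet? row j).getD ' '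

-- grid[i][j]
def pvCell (grid : List String) (i j : Int) : Char :=
  pvCharAt ((PySem.List.pyGet? grid i).getD "") j

def pvScoreElement (c : Char) : Int :=
  if c = 'o' then 2
  else if c = '+' ∨ c = 'x' then 1
  else 0

def score_grid (grid : List String) : Int :=
  let n : Int := grid.length
  (PySem.List.pyRange 0 n 1).foldl (fun s i =>
    (PySem.List.pyRange 0 n 1).foldl (fun s j =>
      s + pvScoreElement (pvCell grid i j)) s) 0

-- ===== PORT B =====
-- column j as a string: ''.join(row[j] for row in grid)
def pvColumn (grid : List String) (j : Int) : String :=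
  PySem.Str.join "" (grid.map (fun row => String.ofList [pvCharAt row j]))

def score_grid_alt (grid : List String) : Int :=
  let n : Int := grid.length
  (PySem.List.pyRange 0 n 1).foldl (fun total j =>
    total + 2 * (PySem.Str.count (pvColumn grid j) "o" : Int)
          + (PySem.Str.count (pvColumn grid j) "+" : Int)
          + (PySem.Str.count (pvColumn grid j) "x" : Int)) 0

-- ===== PRECONDITION & SPEC =====
def Pre_score_grid (grid : List String) : Prop :=
  ∀ s ∈ grid, grid.length ≤ s.toList.length
instance (grid : List String) : Decidable (Pre_score_grid grid) := by unfold Pre_score_grid; infer_instance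

def pvWitness_score_grid : List String := ["o+", ".x"]

def Spec_score_grid (grid : List String) (out : Int) : Prop := out = score_grid_alt grid
instance (grid : List String) (out : Int) : Decidable (Spec_score_grid grid out) := by unfold Spec_score_grid; infer_instance

-- ===== CLAIM (what is proved, stated in full; the proofs are below) =====
def Claim_equal_score_grid : Prop := ∀ (grid : List String), Dom_score_grid grid → Pre_score_grid grid → Spec_score_grid grid (score_grid grid)

-- ===== LEMMAS AND PROOFS =====

-- Chars.count of a single-character needle is List.count.
theorem pv_count_go_singleton (c : Char) (cs : List Char) : ∀ (fuel acc : ℕ), cs.length ≤ fuel →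
    PySem.Chars.count.go [c] fuel cs acc = acc + cs.count c := by
  induction cs with
  | nil => intro fuel acc h; cases fuel <;> simp [PySem.Chars.count.go]
  | cons h t ih =>
    intro fuel acc hle
    cases fuel with
    | zero => simp at hle
    | succ f =>
      rw [PySem.Chars.count.go]
      by_cases hc : h = c
      · simp [hc, List.isPrefixOf, ih f _ (by simpa using hle)]
        omega
      · simp [List.isPrefixOf, hc, ih f _ (by simpa using hle), Ne.symm hc]

theorem pv_count_singleton (c : Char) (cs : List Char) :
    PySem.Chars.count cs [c] = cs.count c := by
  simp [PySem.Chars.count, pv_count_go_singleton c cs cs.length _ le_rfl]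

-- an accumulate-only foldl is a sum over the mapped list
theorem pv_foldl_add {α : Type} (l : List α) (g : α → Int) (a : Int) :
    l.foldl (fun s x => s + g x) a = a + (l.map g).sum := by
  induction l generalizing a with
  | nil => simp
  | cons x t ih => simp only [List.foldl_cons, ih, List.map_cons, List.sum_cons]; ring

-- the weighted counts of a char list equal the sum of its per-char scores
theorem pv_sum_score (l : List Char) :
    (l.map pvScoreElement).sum
      = 2 * (l.count 'o' : Int) + (l.count '+' : Int) + (l.count 'x' : Int) := by
  induction l with
  | nil => simp
  | cons c t ih =>
    simp only [List.map_cons, List.sum_cons, ih, List.count_cons]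
    by_cases ho : c = 'o' <;> by_cases hp : c = '+' <;> by_cases hx : c = 'x' <;>
      simp_all [pvScoreElement] <;> ring

-- exchanging the two summations (row-major ↔ column-major)
theorem pv_sum_comm {α β : Type} (l1 : List α) (l2 : List β) (f : α → β → Int) :
    (l1.map (fun i => (l2.map (f i)).sum)).sum
      = (l2.map (fun j => (l1.map (fun i => f i j)).sum)).sum := by
  induction l1 with
  | nil => simp
  | cons x t ih =>
    simp only [List.map_cons, List.sum_cons, ih]
    rw [← PySem.List.sum_map_add_int]

-- the characters of column j
theorem pv_column_toList (grid : List String) (j : Int) :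
    (pvColumn grid j).toList = grid.map (fun row => pvCharAt row j) := by
  rw [pvColumn, PySem.Str.toList_join, List.map_map]
  have : (String.toList ∘ fun row => String.ofList [pvCharAt row j])
      = (fun c => [c]) ∘ (fun row => pvCharAt row j) := by
    funext row; simp
  have h0 : ("" : String).toList = ([] : List Char) := by decide
  rw [this, ← List.map_map, h0, PySem.Chars.join_nil_singletons]

-- B's weighted column counts are the column's summed scores
theorem pv_col_score (grid : List String) (j : Int) :
    2 * (PySem.Str.count (pvColumn grid j) "o" : Int)
      + (PySem.Str.count (pvColumn grid j) "+" : Int)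
      + (PySem.Str.count (pvColumn grid j) "x" : Int)
    = ((grid.map (fun row => pvCharAt row j)).map pvScoreElement).sum := by
  have ho : ("o" : String).toList = ['o'] := by decide
  have hp : ("+" : String).toList = ['+'] := by decide
  have hx : ("x" : String).toList = ['x'] := by decide
  rw [pv_sum_score]
  simp only [PySem.Str.count_eq, ho, hp, hx, pv_count_singleton, pv_column_toList]

-- ===== VERDICT (by name: the statement is the Claim_ definition above) =====
theorem score_grid_spec : Claim_equal_score_grid := by
  intro grid _ _
  show score_grid grid = score_grid_alt grid
  simp only [score_grid, score_grid_alt]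
  -- turn both nested loops into sums
  have hA : (PySem.List.pyRange 0 (grid.length : Int) 1).foldl (fun s i =>
        (PySem.List.pyRange 0 (grid.length : Int) 1).foldl (fun s j =>
          s + pvScoreElement (pvCell grid i j)) s) 0
      = ((PySem.List.pyRange 0 (grid.length : Int) 1).map (fun i =>
          ((PySem.List.pyRange 0 (grid.length : Int) 1).map (fun j =>
            pvScoreElement (pvCell grid i j))).sum)).sum := by
    rw [PySem.List.foldl_congr_mem _ _
      (fun s i => s + ((PySem.List.pyRange 0 (grid.length : Int) 1).map (fun j =>
        pvScoreElement (pvCell grid i j))).sum) 0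
      (fun s i _ => pv_foldl_add _ _ s), pv_foldl_add]
    simp
  have hB : (PySem.List.pyRange 0 (grid.length : Int) 1).foldl (fun total j =>
        total + 2 * (PySem.Str.count (pvColumn grid j) "o" : Int)
              + (PySem.Str.count (pvColumn grid j) "+" : Int)
              + (PySem.Str.count (pvColumn grid j) "x" : Int)) 0
      = ((PySem.List.pyRange 0 (grid.length : Int) 1).map (fun j =>
          ((grid.map (fun row => pvCharAt row j)).map pvScoreElement).sum)).sum := by
    have : ∀ (total j : Int),
        total + 2 * (PySem.Str.count (pvColumn grid j) "o" : Int)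
              + (PySem.Str.count (pvColumn grid j) "+" : Int)
              + (PySem.Str.count (pvColumn grid j) "x" : Int)
        = total + ((grid.map (fun row => pvCharAt row j)).map pvScoreElement).sum := by
      intro total j; rw [← pv_col_score]; ring
    rw [PySem.List.foldl_congr_mem _ _
      (fun total j => total + ((grid.map (fun row => pvCharAt row j)).map pvScoreElement).sum) 0
      (fun total j _ => this total j), pv_foldl_add]
    simp
  rw [hA, hB]
  -- A reads row i of the grid; replace the i-range by the rows themselves, then swap the sums
  have hrows : ∀ (F : String → Int),
      (PySem.List.pyRange 0 (grid.length : Int) 1).map (fun i => F (PySem.List.pyGetD grid i ""))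
        = grid.map F := by
    intro F
    conv_rhs => rw [← PySem.List.map_pyGetD_pyRange_zero' grid "", List.map_map]
    rfl
  have h2 : (PySem.List.pyRange 0 (grid.length : Int) 1).map (fun i =>
        ((PySem.List.pyRange 0 (grid.length : Int) 1).map (fun j =>
          pvScoreElement (pvCell grid i j))).sum)
      = grid.map (fun row =>
          ((PySem.List.pyRange 0 (grid.length : Int) 1).map (fun j =>
            pvScoreElement (pvCharAt row j))).sum) :=
    hrows (fun row => ((PySem.List.pyRange 0 (grid.length : Int) 1).map (fun j =>
      pvScoreElement (pvCharAt row j))).sum)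
  rw [h2, pv_sum_comm]
  simp [List.map_map, Function.comp_def]
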